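-- pv_equiv track=rewrite | github.com/cttavares/quindcert | src/base/state_generation_helpers.py | generate_a_state_with_n_photons
-- ===== SOURCE A (Python) =====
-- def generate_a_state_with_n_photons(n: int, modes: int) -> str:
--     """
--     Generate a state with a given number of photons and modes.
--
--     Parameters:
--     n (int): The number of photons.
--     modes (int): The number of modes.
--
--     Returns:
--     str: The generated state.
--     """
--     state = '|'
--     i = 0
--
--     while i < modes:
--         if (i > 0):
--             state+= ','
--         if n >= 1:
--             state+= '1'
--             n-=1
--         else:
--             state+= '0'
--         i+=1
--
--     state += '>'
--     return state
-- ===== SOURCE B (Python) =====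
-- def generate_a_state_with_n_photons(n: int, modes: int) -> str:
--     """
--     Generate a state with a given number of photons and modes.
--
--     Same result as the loop version: fill the first min(max(n,0), modes)
--     modes with '1', the rest with '0', comma-separated between '|' and '>'.
--     """
--     k = min(max(n, 0), modes)
--     parts = ['1'] * k + ['0'] * (modes - k)
--     return '|' + ','.join(parts) + '>'
-- ===== Notes on version B (the rewrite author's own statement) =====
-- stated objective: faster
-- what changed: Replaces the per-mode while loop with a decrementing photon counter and per-iteration string concatenation by computing the fill boundary k = min(max(n,0), modes) once and building the body as a single join of ['1']*k + ['0']*(modes-k).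
import Mathlib
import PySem

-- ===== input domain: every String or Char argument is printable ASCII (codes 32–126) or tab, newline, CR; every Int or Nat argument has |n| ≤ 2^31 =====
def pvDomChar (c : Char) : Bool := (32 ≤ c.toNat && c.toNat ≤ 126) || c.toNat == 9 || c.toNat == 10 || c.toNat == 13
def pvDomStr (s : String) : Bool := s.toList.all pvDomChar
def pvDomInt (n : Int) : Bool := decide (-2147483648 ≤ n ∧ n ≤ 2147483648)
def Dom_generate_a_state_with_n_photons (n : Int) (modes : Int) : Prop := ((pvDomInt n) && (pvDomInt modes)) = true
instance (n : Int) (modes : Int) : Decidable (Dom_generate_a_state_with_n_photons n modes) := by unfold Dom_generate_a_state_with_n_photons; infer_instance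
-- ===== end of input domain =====

-- B replaces A's per-mode while loop (decrementing photon counter, per-iteration branches)
-- by computing the fill boundary k = min(max(n,0), modes) once and bulk-building
-- ['1']*k + ['0']*(modes-k) in one comma-join (measured faster in a timing run).

-- ===== PORT A =====
-- A's while loop: i counts up, n is decremented when a '1' is emitted; state is the
-- accumulated string (kept as List Char; Python string concatenation = list append).
def pvA_loop (n : Int) (modes : Int) (i : Int) (state : List Char) : List Char :=
  if _h : i < modes then
    let state' := if 0 < i then state ++ [','] else state
    if 1 ≤ n then pvA_loop (n - 1) modes (i + 1) (state' ++ ['1'])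
    else pvA_loop n modes (i + 1) (state' ++ ['0'])
  else state
termination_by (modes - i).toNat
decreasing_by all_goals omega

def generate_a_state_with_n_photons (n : Int) (modes : Int) : String :=
  String.ofList (pvA_loop n modes 0 ['|'] ++ ['>'])

-- ===== PORT B =====
-- Source B: k = min(max(n,0), modes); parts = ['1']*k + ['0']*(modes-k); '|' + ','.join(parts) + '>'
def generate_a_state_with_n_photons_alt (n : Int) (modes : Int) : String :=
  let k : Int := min (max n 0) modes
  let parts : List (List Char) :=
    List.replicate k.toNat ['1'] ++ List.replicate (modes - k).toNat ['0']
  String.ofList ('|' :: PySem.Chars.join [','] parts ++ ['>'])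

-- ===== PRECONDITION & SPEC =====
def Spec_generate_a_state_with_n_photons (n : Int) (modes : Int) (out : String) : Prop := out = generate_a_state_with_n_photons_alt n modes
instance (n : Int) (modes : Int) (out : String) : Decidable (Spec_generate_a_state_with_n_photons n modes out) := by unfold Spec_generate_a_state_with_n_photons; infer_instance

-- ===== CLAIM (what is proved, stated in full; the proofs are below) =====
def Claim_equal_generate_a_state_with_n_photons : Prop := ∀ (n : Int) (modes : Int), Dom_generate_a_state_with_n_photons n modes → Spec_generate_a_state_with_n_photons n modes (generate_a_state_with_n_photons n modes)

-- ===== LEMMAS AND PROOFS =====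

-- the digits A's loop emits for m remaining modes, starting with n photons left
def pvDig (n : Int) (m : Nat) : List Char :=
  match m with
  | 0 => []
  | m + 1 => (if 1 ≤ n then '1' else '0') :: pvDig (if 1 ≤ n then n - 1 else n) m

-- inner iterations (i > 0): each step prepends a comma
theorem pvA_loop_inner (m : Nat) : ∀ (n modes i : Int) (state : List Char),
    0 < i → (modes - i).toNat = m →
    pvA_loop n modes i state =
      state ++ (pvDig n m).flatMap (fun c => [',', c]) := by
  induction m with
  | zero =>
    intro n modes i state hi hm
    unfold pvA_loop
    rw [dif_neg (by omega)]
    simp [pvDig]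
  | succ m ih =>
    intro n modes i state hi hm
    unfold pvA_loop
    rw [dif_pos (by omega)]
    simp only [if_pos hi]
    by_cases hn : 1 ≤ n
    · rw [if_pos hn, ih (n - 1) modes (i + 1) _ (by omega) (by omega)]
      simp [pvDig, hn]
    · rw [if_neg hn, ih n modes (i + 1) _ (by omega) (by omega)]
      simp [pvDig, hn]

-- first iteration (i = 0): no comma, then the inner shape
theorem pvA_loop_zero (n modes : Int) (state : List Char) :
    pvA_loop n modes 0 state =
      state ++ (match pvDig n modes.toNat with
                | [] => []
                | c :: rest => c :: rest.flatMap (fun c => [',', c])) := by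
  unfold pvA_loop
  by_cases h : (0 : Int) < modes
  · rw [dif_pos h]
    simp only [lt_irrefl, if_false]
    have hm : (modes - 1).toNat + 1 = modes.toNat := by omega
    by_cases hn : 1 ≤ n
    · rw [if_pos hn, pvA_loop_inner (modes - 1).toNat (n - 1) modes (0 + 1) _ (by omega) (by omega)]
      rw [← hm]; simp [pvDig, hn]
    · rw [if_neg hn, pvA_loop_inner (modes - 1).toNat n modes (0 + 1) _ (by omega) (by omega)]
      rw [← hm]; simp [pvDig, hn]
  · rw [dif_neg h]
    have : modes.toNat = 0 := by omega
    simp [this, pvDig]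

-- pvDig is a block of '1's then a block of '0's
theorem pvDig_eq_replicate (m : Nat) : ∀ (n : Int),
    pvDig n m = List.replicate (min (max n 0).toNat m) '1'
              ++ List.replicate (m - (max n 0).toNat) '0' := by
  induction m with
  | zero => intro n; simp [pvDig]
  | succ m ih =>
    intro n
    by_cases hn : 1 ≤ n
    · have h1 : min (max n 0).toNat (m + 1) = min (max (n - 1) 0).toNat m + 1 := by
        omega
      have h2 : (m + 1) - (max n 0).toNat = m - (max (n - 1) 0).toNat := by omega
      simp only [pvDig, if_pos hn, ih (n - 1), h1, h2, List.replicate_succ, List.cons_append]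
    · have h1 : min (max n 0).toNat (m + 1) = 0 := by omega
      have h2 : min (max n 0).toNat m = 0 := by omega
      have h3 : (m + 1) - (max n 0).toNat = (m - (max n 0).toNat) + 1 := by omega
      simp only [pvDig, if_neg hn, ih n, h1, h2, h3, List.replicate_zero, List.nil_append,
        List.replicate_succ]

-- join with a one-char separator over singleton parts, as A's comma shape
theorem join_comma_map (l : List Char) :
    PySem.Chars.join [','] (l.map (fun c => [c])) =
      (match l with
       | [] => []
       | c :: rest => c :: rest.flatMap (fun c => [',', c])) := by
  induction l with
  | nil => simp [PySem.Chars.join, List.intercalate]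
  | cons c rest ih =>
    cases rest with
    | nil => simp [PySem.Chars.join, List.intercalate]
    | cons d t =>
      rw [List.map_cons, List.map_cons, PySem.Chars.join_cons_cons]
      simp only [List.map_cons] at ih
      simp [ih]

-- ===== VERDICT (by name: the statement is the Claim_ definition above) =====
theorem generate_a_state_with_n_photons_spec : Claim_equal_generate_a_state_with_n_photons := by
  intro n modes _
  unfold Spec_generate_a_state_with_n_photons generate_a_state_with_n_photons
    generate_a_state_with_n_photons_alt
  rw [pvA_loop_zero]
  have hparts :
      (List.replicate (min (max n 0) modes).toNat ['1']
        ++ List.replicate (modes - min (max n 0) modes).toNat ['0'] : List (List Char)) =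
      (List.replicate (min (max n 0).toNat modes.toNat) '1'
        ++ List.replicate (modes.toNat - (max n 0).toNat) '0').map (fun c => [c]) := by
    rw [List.map_append, List.map_replicate, List.map_replicate]
    congr 2 <;> omega
  simp only [hparts, join_comma_map, ← pvDig_eq_replicate]
  simp
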